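-- pv_equiv track=rewrite | github.com/pypi-data/pypi-mirror-96 | packages/getml/getml-0.15.0-py3-none-any.whl/getml/data/helpers.py | _update_sniffed_roles
-- ===== SOURCE A (Python) =====
-- def _is_typed_list(some_list, types):
--
--     if not isinstance(types, list):
--         types = [types]
--
--     is_typed_list = isinstance(some_list, list)
--
--     is_typed_list = is_typed_list and all(
--         [any([isinstance(ll, t) for t in types]) for ll in some_list]
--     )
--
--     return is_typed_list
--
-- def _update_sniffed_roles(sniffed_roles, roles):
--
--     # -------------------------------------------------------
--
--     if not isinstance(roles, dict):
--         raise TypeError("roles must be a dict!")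
--
--     if not isinstance(sniffed_roles, dict):
--         raise TypeError("sniffed_roles must be a dict!")
--
--     for role in list(roles.keys()):
--         if not _is_typed_list(roles[role], str):
--             raise TypeError("Entries in roles must be lists of str!")
--
--     for role in list(sniffed_roles.keys()):
--         if not _is_typed_list(sniffed_roles[role], str):
--             raise TypeError("Entries in sniffed_roles must be lists of str!")
--
--     # -------------------------------------------------------
--
--     for new_role in list(roles.keys()):
--
--         for colname in roles[new_role]:
--
--             for old_role in list(sniffed_roles.keys()):
--                 if colname in sniffed_roles[old_role]:
--                     sniffed_roles[old_role].remove(colname)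
--                     break
--
--             if new_role in sniffed_roles:
--                 sniffed_roles[new_role] += [colname]
--             else:
--                 sniffed_roles[new_role] = [colname]
--
--     # -------------------------------------------------------
--
--     return sniffed_roles
-- ===== SOURCE B (Python) =====
-- def _update_sniffed_roles(sniffed_roles, roles):
--     # Faster: a reverse column->role multiset index replaces A's scan over all
--     # role lists for every column. Mutates sniffed_roles in place, like A.
--     order = {}   # role -> position in key order (keys are never removed)
--     index = {}   # colname -> {role: multiplicity of colname in sniffed_roles[role]}
--     for r, cols in sniffed_roles.items():
--         order[r] = len(order)
--         for c in cols:
--             inner = index.setdefault(c, {})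
--             inner[r] = inner.get(r, 0) + 1
--
--     for new_role, cols in roles.items():
--         for colname in cols:
--             inner = index.get(colname)
--             if inner is not None:
--                 best = None
--                 for r, k in inner.items():
--                     if k > 0 and (best is None or order[r] < order[best]):
--                         best = r
--                 if best is not None:
--                     sniffed_roles[best].remove(colname)
--                     inner[best] -= 1
--             if new_role in sniffed_roles:
--                 sniffed_roles[new_role].append(colname)
--             else:
--                 sniffed_roles[new_role] = [colname]
--                 order[new_role] = len(order)
--             inner = index.setdefault(colname, {})
--             inner[new_role] = inner.get(new_role, 0) + 1
--     return sniffed_roles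
-- ===== Notes on version B (the rewrite author's own statement) =====
-- stated objective: faster
-- what changed: B builds a reverse column->role multiplicity index plus a role->position map once, so the role a column currently belongs to is found by an argmin over the few roles that ever held that column instead of A's scan over every role list for every column.
import Mathlib
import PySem

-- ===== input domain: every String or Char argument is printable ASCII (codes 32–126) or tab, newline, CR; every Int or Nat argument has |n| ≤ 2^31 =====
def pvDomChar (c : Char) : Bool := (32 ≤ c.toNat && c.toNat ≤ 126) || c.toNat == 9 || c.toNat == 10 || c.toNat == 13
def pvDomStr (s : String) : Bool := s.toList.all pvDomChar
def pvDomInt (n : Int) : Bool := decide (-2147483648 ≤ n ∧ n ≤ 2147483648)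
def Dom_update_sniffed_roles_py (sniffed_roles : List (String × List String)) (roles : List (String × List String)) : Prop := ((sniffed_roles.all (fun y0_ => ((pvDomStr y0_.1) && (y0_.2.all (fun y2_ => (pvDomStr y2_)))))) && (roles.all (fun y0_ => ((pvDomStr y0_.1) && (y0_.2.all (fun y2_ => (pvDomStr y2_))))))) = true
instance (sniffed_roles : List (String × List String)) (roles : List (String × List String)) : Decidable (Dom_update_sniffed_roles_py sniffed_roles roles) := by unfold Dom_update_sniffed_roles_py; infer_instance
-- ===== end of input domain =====

-- ===== PORT A =====
-- B replaces A's per-column scan over every role list with a reverse column->role index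
-- maintained incrementally. Return-value equivalence (both Pythons also mutate sniffed_roles in place).
def aStep (new_role : String) (s : PySem.Dict String (List String)) (colname : String) :
    PySem.Dict String (List String) :=
  let s1 :=
    match s.keys.find? (fun old => (s.getD old []).contains colname) with
    | some old => s.insert old ((PySem.List.remove? (s.getD old []) colname).getD (s.getD old []))
    | none => s
  if s1.contains new_role then s1.insert new_role (s1.getD new_role [] ++ [colname])
  else s1.insert new_role [colname]

def update_sniffed_roles_py (sniffed_roles : List (String × List String)) (roles : List (String × List String)) : List (String × List String) :=
  let sn := PySem.Dict.ofList sniffed_roles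
  let rd := PySem.Dict.ofList roles
  (rd.keys.foldl (fun s new_role => (rd.getD new_role []).foldl (aStep new_role) s) sn).items

-- ===== PORT B =====
def bInitCol (r : String) (ix : PySem.Dict String (PySem.Dict String Int)) (c : String) :
    PySem.Dict String (PySem.Dict String Int) :=
  let inner := ix.getD c PySem.Dict.empty
  ix.insert c (inner.insert r (inner.getD r 0 + 1))

def bInit (sn : PySem.Dict String (List String)) :
    PySem.Dict String Int × PySem.Dict String (PySem.Dict String Int) :=
  sn.items.foldl
    (fun oi p => (oi.1.insert p.1 (oi.1.size : Int), p.2.foldl (bInitCol p.1) oi.2))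
    (PySem.Dict.empty, PySem.Dict.empty)

-- one iteration of Source B's argmin loop over the inner index entry
def pickStep (order : PySem.Dict String Int) : Option String → String × Int → Option String
  | none, p => if (0:Int) < p.2 then some p.1 else none
  | some b, p => if (0:Int) < p.2 ∧ order.getD p.1 0 < order.getD b 0 then some p.1 else some b

def bPick (order : PySem.Dict String Int) (inner : PySem.Dict String Int) : Option String :=
  inner.items.foldl (pickStep order) none

-- "inner = index.get(colname); best = <argmin loop>" of Source B
def bFind (order : PySem.Dict String Int) (ix : PySem.Dict String (PySem.Dict String Int))
    (colname : String) : Option String :=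
  match ix.get? colname with
  | none => none
  | some inner => bPick order inner

-- remove colname from the role currently holding it (found through the index, not by scanning roles)
def bRemove (colname : String) (sn : PySem.Dict String (List String)) (order : PySem.Dict String Int)
    (ix : PySem.Dict String (PySem.Dict String Int)) :
    PySem.Dict String (List String) × PySem.Dict String (PySem.Dict String Int) :=
  match bFind order ix colname with
  | none => (sn, ix)
  | some b =>
    (sn.insert b ((PySem.List.remove? (sn.getD b []) colname).getD (sn.getD b [])),
     ix.insert colname ((ix.getD colname PySem.Dict.empty).insert b
       ((ix.getD colname PySem.Dict.empty).getD b 0 - 1)))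

def bAppend (new_role colname : String) (sn : PySem.Dict String (List String))
    (order : PySem.Dict String Int) :
    PySem.Dict String (List String) × PySem.Dict String Int :=
  if sn.contains new_role then (sn.insert new_role (sn.getD new_role [] ++ [colname]), order)
  else (sn.insert new_role [colname], order.insert new_role (order.size : Int))

def bStep (new_role : String)
    (st : PySem.Dict String (List String) × PySem.Dict String Int × PySem.Dict String (PySem.Dict String Int))
    (colname : String) :
    PySem.Dict String (List String) × PySem.Dict String Int × PySem.Dict String (PySem.Dict String Int) :=
  let rem := bRemove colname st.1 st.2.1 st.2.2
  let app := bAppend new_role colname rem.1 st.2.1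
  let inner1 := rem.2.getD colname PySem.Dict.empty
  (app.1, app.2, rem.2.insert colname (inner1.insert new_role (inner1.getD new_role 0 + 1)))

def update_sniffed_roles_py_alt (sniffed_roles : List (String × List String)) (roles : List (String × List String)) : List (String × List String) :=
  let sn := PySem.Dict.ofList sniffed_roles
  let oi := bInit sn
  let rd := PySem.Dict.ofList roles
  (rd.items.foldl (fun st p => p.2.foldl (bStep p.1) st) (sn, oi.1, oi.2)).1.items

-- ===== PRECONDITION & SPEC =====
def Spec_update_sniffed_roles_py (sniffed_roles : List (String × List String)) (roles : List (String × List String)) (out : List (String × List String)) : Prop := out = update_sniffed_roles_py_alt sniffed_roles roles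
instance (sniffed_roles : List (String × List String)) (roles : List (String × List String)) (out : List (String × List String)) : Decidable (Spec_update_sniffed_roles_py sniffed_roles roles out) := by unfold Spec_update_sniffed_roles_py; infer_instance

-- ===== CLAIM (what is proved, stated in full; the proofs are below) =====
def Claim_equal_update_sniffed_roles_py : Prop := ∀ (sniffed_roles : List (String × List String)) (roles : List (String × List String)), Dom_update_sniffed_roles_py sniffed_roles roles → Spec_update_sniffed_roles_py sniffed_roles roles (update_sniffed_roles_py sniffed_roles roles)

-- ===== LEMMAS AND PROOFS =====

-- The invariant tying B's auxiliary structures to the current dict: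
-- order maps each key to its position, the index holds exact multiplicities.
def StInv (sn : PySem.Dict String (List String)) (order : PySem.Dict String Int)
    (ix : PySem.Dict String (PySem.Dict String Int)) : Prop :=
  sn.keys.Nodup ∧
  order.keys = sn.keys ∧
  (∀ r ∈ sn.keys, order.getD r 0 = (sn.keys.idxOf r : Int)) ∧
  (∀ c, (ix.getD c PySem.Dict.empty).keys.Nodup) ∧
  (∀ c r, (ix.getD c PySem.Dict.empty).getD r 0 = ((sn.getD r []).count c : Int))

lemma not_contains_of_not_mem {ν : Type} (d : PySem.Dict String ν) (k : String)
    (h : k ∉ d.keys) : d.contains k = false := by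
  cases hc : d.contains k
  · rfl
  · exact absurd ((PySem.Dict.contains_iff_mem_keys _ _).mp hc) h

lemma getD_pos_mem (sn : PySem.Dict String (List String)) (r c : String)
    (h : 0 < (sn.getD r []).count c) : r ∈ sn.keys := by
  by_contra hr
  rw [PySem.Dict.getD_of_not_contains _ _ (not_contains_of_not_mem sn r hr)] at h
  simp at h

-- the argmin loop of bPick: if it returns some b, b is active and has minimal order value
lemma pick_go (order : PySem.Dict String Int) (l : List (String × Int)) (acc : Option String) :
    (l.foldl (pickStep order) acc = none → acc = none ∧ ∀ p ∈ l, ¬ (0:Int) < p.2) ∧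
    (∀ b, l.foldl (pickStep order) acc = some b →
       (acc = some b ∨ ∃ k, (b, k) ∈ l ∧ (0:Int) < k) ∧
       (∀ p ∈ l, (0:Int) < p.2 → order.getD b 0 ≤ order.getD p.1 0) ∧
       (∀ a, acc = some a → order.getD b 0 ≤ order.getD a 0)) := by
  induction l generalizing acc with
  | nil =>
    simp only [List.foldl_nil]
    exact ⟨fun h => ⟨h, by simp⟩,
      fun b h => ⟨Or.inl h, by simp, fun a ha => by rw [h] at ha; cases ha; exact le_refl _⟩⟩
  | cons p l ih =>
    simp only [List.foldl_cons]
    constructor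
    · intro h
      obtain ⟨h1, h2⟩ := (ih _).1 h
      cases acc with
      | none =>
        simp only [pickStep] at h1
        by_cases hp : (0:Int) < p.2
        · simp [hp] at h1
        · exact ⟨rfl, by
            intro q hq
            rcases List.mem_cons.mp hq with rfl | hq'
            · exact hp
            · exact h2 q hq'⟩
      | some a0 =>
        simp only [pickStep] at h1
        split_ifs at h1
    · intro b h
      obtain ⟨hw, hmin, hacc⟩ := (ih _).2 b h
      cases acc with
      | none =>
        simp only [pickStep] at hw hacc
        by_cases hp : (0:Int) < p.2
        · have hstep : (if (0:Int) < p.2 then some p.1 else none) = some p.1 := by simp [hp]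
          refine ⟨?_, ?_, ?_⟩
          · rcases hw with hw | ⟨k, hk, hkpos⟩
            · rw [hstep] at hw
              cases hw
              exact Or.inr ⟨p.2, by simp, hp⟩
            · exact Or.inr ⟨k, List.mem_cons_of_mem _ hk, hkpos⟩
          · intro q hq hqpos
            rcases List.mem_cons.mp hq with rfl | hq'
            · exact hacc _ hstep
            · exact hmin q hq' hqpos
          · intro a ha; cases ha
        · have hstep : (if (0:Int) < p.2 then some p.1 else none) = none := by simp [hp]
          refine ⟨?_, ?_, ?_⟩
          · rcases hw with hw | ⟨k, hk, hkpos⟩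
            · rw [hstep] at hw; cases hw
            · exact Or.inr ⟨k, List.mem_cons_of_mem _ hk, hkpos⟩
          · intro q hq hqpos
            rcases List.mem_cons.mp hq with rfl | hq'
            · exact absurd hqpos hp
            · exact hmin q hq' hqpos
          · intro a ha; cases ha
      | some a0 =>
        simp only [pickStep] at hw hacc
        by_cases hc : (0:Int) < p.2 ∧ order.getD p.1 0 < order.getD a0 0
        · have hstep : (if (0:Int) < p.2 ∧ order.getD p.1 0 < order.getD a0 0 then some p.1 else some a0) = some p.1 := by
            simp [hc]
          refine ⟨?_, ?_, ?_⟩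
          · rcases hw with hw | ⟨k, hk, hkpos⟩
            · rw [hstep] at hw
              cases hw
              exact Or.inr ⟨p.2, by simp, hc.1⟩
            · exact Or.inr ⟨k, List.mem_cons_of_mem _ hk, hkpos⟩
          · intro q hq hqpos
            rcases List.mem_cons.mp hq with rfl | hq'
            · exact hacc _ hstep
            · exact hmin q hq' hqpos
          · intro a ha
            cases ha
            exact le_trans (hacc _ hstep) (le_of_lt hc.2)
        · have hstep : (if (0:Int) < p.2 ∧ order.getD p.1 0 < order.getD a0 0 then some p.1 else some a0) = some a0 := by
            simp [hc]
          refine ⟨?_, ?_, ?_⟩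
          · rcases hw with hw | ⟨k, hk, hkpos⟩
            · rw [hstep] at hw; cases hw; exact Or.inl rfl
            · exact Or.inr ⟨k, List.mem_cons_of_mem _ hk, hkpos⟩
          · intro q hq hqpos
            rcases List.mem_cons.mp hq with rfl | hq'
            · have hnlt : ¬ order.getD q.1 0 < order.getD a0 0 := fun hlt => hc ⟨hqpos, hlt⟩
              exact le_trans (hacc _ hstep) (le_of_not_gt hnlt)
            · exact hmin q hq' hqpos
          · intro a ha
            cases ha
            exact hacc _ hstep

lemma find?_min (p : String → Bool) (K : List String) (hnd : K.Nodup) (b : String)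
    (hb : b ∈ K) (hpb : p b = true)
    (hmin : ∀ r ∈ K, p r = true → K.idxOf b ≤ K.idxOf r) :
    K.find? p = some b := by
  induction K with
  | nil => cases hb
  | cons k ks ih =>
    by_cases hpk : p k = true
    · have h0 := hmin k List.mem_cons_self hpk
      rw [List.idxOf_cons_self] at h0
      have hbk : b = k := by
        by_contra hne
        rw [List.idxOf_cons_ne _ (Ne.symm hne)] at h0
        omega
      subst hbk
      simp [hpk]
    · have hbk : b ≠ k := fun h => hpk (h ▸ hpb)
      have hb' : b ∈ ks := by
        rcases List.mem_cons.mp hb with rfl | h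
        · exact absurd hpb hpk
        · exact h
      have hknin : k ∉ ks := (List.nodup_cons.mp hnd).1
      have := ih (List.nodup_cons.mp hnd).2 hb' ?_
      · simp [hpk, this]
      · intro r hr hpr
        have hrk : r ≠ k := fun h => hknin (h ▸ hr)
        have := hmin r (List.mem_cons_of_mem _ hr) hpr
        rw [List.idxOf_cons_ne _ (Ne.symm hbk), List.idxOf_cons_ne _ (Ne.symm hrk)] at this
        omega

lemma pick_eq (sn : PySem.Dict String (List String)) (order : PySem.Dict String Int)
    (ix : PySem.Dict String (PySem.Dict String Int)) (c : String) (h : StInv sn order ix) :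
    bFind order ix c = sn.keys.find? (fun old => (sn.getD old []).contains c) := by
  obtain ⟨hnd, hok, hov, hixnd, hcnt⟩ := h
  unfold bFind
  cases hget : ix.get? c with
  | none =>
    have hempty : ix.getD c PySem.Dict.empty = PySem.Dict.empty :=
      PySem.Dict.getD_of_get?_eq_none _ _ hget
    show (none : Option String) = _
    symm
    rw [List.find?_eq_none]
    intro r hr hcon
    have hmem : c ∈ sn.getD r [] := by simpa using hcon
    have hpos := List.count_pos_iff.mpr hmem
    have h0 := hcnt c r
    rw [hempty, PySem.Dict.getD_empty] at h0
    omega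
  | some inner =>
    have hinner : ix.getD c PySem.Dict.empty = inner :=
      PySem.Dict.getD_of_get?_eq_some _ _ hget
    have hndi : inner.keys.Nodup := hinner ▸ hixnd c
    have hcv : ∀ r, inner.getD r 0 = ((sn.getD r []).count c : Int) := fun r => hinner ▸ hcnt c r
    show bPick order inner = _
    cases hres : bPick order inner with
    | none =>
      unfold bPick at hres
      obtain ⟨-, hall⟩ := (pick_go order inner.items none).1 hres
      symm
      rw [List.find?_eq_none]
      intro r hr hcon
      have hmem : c ∈ sn.getD r [] := by simpa using hcon
      have hcpos := List.count_pos_iff.mpr hmem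
      have hposI : (0:Int) < inner.getD r 0 := by rw [hcv r]; exact_mod_cast hcpos
      cases hgr : inner.get? r with
      | none =>
        rw [PySem.Dict.getD_of_get?_eq_none _ _ hgr] at hposI
        omega
      | some k =>
        have hk : inner.getD r 0 = k := PySem.Dict.getD_of_get?_eq_some _ _ hgr
        have hm := PySem.Dict.mem_items_of_get?_eq_some _ hgr
        exact hall (r, k) hm (by rw [hk] at hposI; exact hposI)
    | some b =>
      unfold bPick at hres
      obtain ⟨hw, hmin, -⟩ := (pick_go order inner.items none).2 b hres
      rcases hw with hw | ⟨k, hk, hkpos⟩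
      · cases hw
      · have hgb : inner.get? b = some k := PySem.Dict.get?_of_mem_items _ hk hndi
        have hcb : inner.getD b 0 = k := PySem.Dict.getD_of_get?_eq_some _ _ hgb
        have hcount : (0:Int) < ((sn.getD b []).count c : Int) := by
          rw [← hcv b, hcb]; exact hkpos
        have hcountN : 0 < (sn.getD b []).count c := by exact_mod_cast hcount
        have hbK : b ∈ sn.keys := getD_pos_mem sn b c hcountN
        have hpb : (sn.getD b []).contains c = true := by
          simpa using List.count_pos_iff.mp hcountN
        symm
        apply find?_min _ _ hnd b hbK hpb
        intro r hr hpr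
        have hmemr : c ∈ sn.getD r [] := by simpa using hpr
        have hcr := List.count_pos_iff.mpr hmemr
        have hposr : (0:Int) < inner.getD r 0 := by rw [hcv r]; exact_mod_cast hcr
        cases hgr : inner.get? r with
        | none =>
          rw [PySem.Dict.getD_of_get?_eq_none _ _ hgr] at hposr
          omega
        | some k' =>
          have hk' : inner.getD r 0 = k' := PySem.Dict.getD_of_get?_eq_some _ _ hgr
          have hmr := PySem.Dict.mem_items_of_get?_eq_some _ hgr
          have hle := hmin (r, k') hmr (by rw [← hk']; exact hposr)
          rw [hov b hbK, hov r hr] at hle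
          exact_mod_cast hle

-- the removal phase: B finds through the index exactly the role A's scan finds
lemma rem_eq (c : String) (sn : PySem.Dict String (List String)) (order : PySem.Dict String Int)
    (ix : PySem.Dict String (PySem.Dict String Int)) (h : StInv sn order ix) :
    (bRemove c sn order ix).1 =
      (match sn.keys.find? (fun old => (sn.getD old []).contains c) with
        | some old => sn.insert old ((PySem.List.remove? (sn.getD old []) c).getD (sn.getD old []))
        | none => sn) ∧
    StInv (bRemove c sn order ix).1 order (bRemove c sn order ix).2 := by
  obtain ⟨hnd, hok, hov, hixnd, hcnt⟩ := h
  have hpick := pick_eq sn order ix c ⟨hnd, hok, hov, hixnd, hcnt⟩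
  cases hF : sn.keys.find? (fun old => (sn.getD old []).contains c) with
  | none =>
    rw [hF] at hpick
    have hB : bRemove c sn order ix = (sn, ix) := by
      unfold bRemove
      rw [hpick]
    rw [hB]
    exact ⟨rfl, ⟨hnd, hok, hov, hixnd, hcnt⟩⟩
  | some b =>
    rw [hF] at hpick
    have hB : bRemove c sn order ix =
        (sn.insert b ((PySem.List.remove? (sn.getD b []) c).getD (sn.getD b [])),
         ix.insert c ((ix.getD c PySem.Dict.empty).insert b
           ((ix.getD c PySem.Dict.empty).getD b 0 - 1))) := by
      unfold bRemove
      rw [hpick]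
    rw [hB]
    have hpb : (sn.getD b []).contains c = true := List.find?_some (p := fun old => (sn.getD old []).contains c) hF
    have hbK : b ∈ sn.keys := List.mem_of_find?_eq_some hF
    have hmemb : c ∈ sn.getD b [] := by simpa using hpb
    have hcb : 0 < (sn.getD b []).count c := List.count_pos_iff.mpr hmemb
    have hrem : (PySem.List.remove? (sn.getD b []) c).getD (sn.getD b []) = (sn.getD b []).erase c := by
      rw [PySem.List.remove?_eq_some_erase _ _ hmemb]; rfl
    have hcontb : sn.contains b = true := (PySem.Dict.contains_iff_mem_keys _ _).mpr hbK
    have hkeys : (sn.insert b ((PySem.List.remove? (sn.getD b []) c).getD (sn.getD b []))).keys = sn.keys :=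
      PySem.Dict.keys_insert_of_contains _ _ hcontb
    refine ⟨rfl, ?_, ?_, ?_, ?_, ?_⟩
    · rw [hkeys]; exact hnd
    · rw [hkeys]; exact hok
    · rw [hkeys]; exact hov
    · intro c'
      by_cases hc' : c' = c
      · subst hc'
        rw [PySem.Dict.getD_insert_self]
        exact PySem.Dict.nodup_keys_insert _ _ _ (hixnd c')
      · rw [PySem.Dict.getD_insert_of_ne _ _ _ hc']
        exact hixnd c'
    · intro c' r
      by_cases hc' : c' = c
      · subst hc'
        rw [PySem.Dict.getD_insert_self]
        by_cases hr : r = b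
        · subst hr
          rw [PySem.Dict.getD_insert_self, PySem.Dict.getD_insert_self, hrem,
            List.count_erase_self, hcnt c' r]
          push_cast [Nat.cast_sub (by omega : 1 ≤ (sn.getD r []).count c')]
          ring
        · rw [PySem.Dict.getD_insert_of_ne _ _ _ hr, PySem.Dict.getD_insert_of_ne _ _ _ hr]
          exact hcnt c' r
      · rw [PySem.Dict.getD_insert_of_ne _ _ _ hc']
        by_cases hr : r = b
        · subst hr
          rw [PySem.Dict.getD_insert_self, hrem, List.count_erase_of_ne hc', hcnt c' r]
        · rw [PySem.Dict.getD_insert_of_ne _ _ _ hr]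
          exact hcnt c' r

-- the append phase plus index bump preserves the invariant
lemma app_inv (nr c : String) (sn : PySem.Dict String (List String)) (order : PySem.Dict String Int)
    (ix : PySem.Dict String (PySem.Dict String Int)) (h : StInv sn order ix) :
    StInv (bAppend nr c sn order).1 (bAppend nr c sn order).2
      (ix.insert c ((ix.getD c PySem.Dict.empty).insert nr ((ix.getD c PySem.Dict.empty).getD nr 0 + 1))) := by
  obtain ⟨hnd, hok, hov, hixnd, hcnt⟩ := h
  have hcounts : ∀ c' r,
      ((ix.insert c ((ix.getD c PySem.Dict.empty).insert nr ((ix.getD c PySem.Dict.empty).getD nr 0 + 1))).getD c' PySem.Dict.empty).getD r 0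
        = ((if r = nr then sn.getD nr [] ++ [c] else sn.getD r []).count c' : Int) := by
    intro c' r
    by_cases hc' : c' = c
    · subst hc'
      rw [PySem.Dict.getD_insert_self]
      by_cases hr : r = nr
      · subst hr
        rw [PySem.Dict.getD_insert_self, hcnt c' r]
        simp [List.count_append]
      · rw [PySem.Dict.getD_insert_of_ne _ _ _ hr, hcnt c' r]
        simp [hr]
    · rw [PySem.Dict.getD_insert_of_ne _ _ _ hc']
      by_cases hr : r = nr
      · subst hr
        rw [hcnt c' r]
        simp [List.count_append, Ne.symm hc']
      · rw [hcnt c' r]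
        simp [hr]
  have hnodups : ∀ c0, (((ix.insert c ((ix.getD c PySem.Dict.empty).insert nr ((ix.getD c PySem.Dict.empty).getD nr 0 + 1))).getD c0 PySem.Dict.empty)).keys.Nodup := by
    intro c0
    by_cases hc0 : c0 = c
    · subst hc0
      rw [PySem.Dict.getD_insert_self]
      exact PySem.Dict.nodup_keys_insert _ _ _ (hixnd c0)
    · rw [PySem.Dict.getD_insert_of_ne _ _ _ hc0]
      exact hixnd c0
  by_cases hcont : sn.contains nr = true
  · have hkeys : (sn.insert nr (sn.getD nr [] ++ [c])).keys = sn.keys :=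
      PySem.Dict.keys_insert_of_contains _ _ hcont
    simp only [bAppend, hcont, if_true]
    refine ⟨by rw [hkeys]; exact hnd, by rw [hkeys]; exact hok, by rw [hkeys]; exact hov, hnodups, ?_⟩
    intro c' r
    rw [hcounts c' r]
    by_cases hr : r = nr
    · subst hr
      rw [PySem.Dict.getD_insert_self]
      simp
    · rw [PySem.Dict.getD_insert_of_ne _ _ _ hr]
      simp [hr]
  · have hcf : sn.contains nr = false := by
      cases hcc : sn.contains nr
      · rfl
      · exact absurd hcc hcont
    have hnrK : nr ∉ sn.keys := fun hm => hcont ((PySem.Dict.contains_iff_mem_keys _ _).mpr hm)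
    have hkeys : (sn.insert nr [c]).keys = sn.keys ++ [nr] :=
      PySem.Dict.keys_insert_of_not_contains _ _ hcf
    have hocf : order.contains nr = false :=
      not_contains_of_not_mem order nr (by rw [hok]; exact hnrK)
    have hokeys : (order.insert nr (order.size : Int)).keys = order.keys ++ [nr] :=
      PySem.Dict.keys_insert_of_not_contains _ _ hocf
    have hsize : order.size = sn.keys.length := by
      have h1 : order.keys.length = order.items.length := by simp [PySem.Dict.keys]
      rw [← hok, h1]
      rfl
    simp only [bAppend, hcf, Bool.false_eq_true, if_false]
    refine ⟨?_, ?_, ?_, hnodups, ?_⟩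
    · rw [hkeys]
      simp [List.nodup_append, hnd]
      exact fun a ha h => hnrK (h ▸ ha)
    · rw [hokeys, hok, hkeys]
    · intro r hr
      rw [hkeys] at hr ⊢
      rcases List.mem_append.mp hr with hr' | hr'
      · have hrnr : r ≠ nr := fun h => hnrK (h ▸ hr')
        rw [PySem.Dict.getD_insert_of_ne _ _ _ hrnr, List.idxOf_append_of_mem hr']
        exact hov r hr'
      · have hrnr : r = nr := by simpa using hr'
        subst hrnr
        rw [PySem.Dict.getD_insert_self, List.idxOf_append_of_notMem hnrK]
        simp [hsize, List.idxOf_cons_self]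
    · intro c' r
      rw [hcounts c' r]
      by_cases hr : r = nr
      · subst hr
        rw [PySem.Dict.getD_insert_self,
          PySem.Dict.getD_of_not_contains _ _ hcf]
        simp
      · rw [PySem.Dict.getD_insert_of_ne _ _ _ hr]
        simp [hr]

lemma step_eq (nr : String) (sn : PySem.Dict String (List String)) (order : PySem.Dict String Int)
    (ix : PySem.Dict String (PySem.Dict String Int)) (c : String) (h : StInv sn order ix) :
    (bStep nr (sn, order, ix) c).1 = aStep nr sn c ∧
      StInv (bStep nr (sn, order, ix) c).1 (bStep nr (sn, order, ix) c).2.1 (bStep nr (sn, order, ix) c).2.2 := by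
  obtain ⟨he, hinv⟩ := rem_eq c sn order ix h
  have happ := app_inv nr c (bRemove c sn order ix).1 order (bRemove c sn order ix).2 hinv
  constructor
  · show (bAppend nr c (bRemove c sn order ix).1 order).1 = aStep nr sn c
    rw [he]
    unfold aStep bAppend
    dsimp only
    split_ifs <;> rfl
  · exact happ

-- ===== initialisation =====
lemma initcol_nodup (r0 : String) (cols : List String) (ix : PySem.Dict String (PySem.Dict String Int))
    (h : ∀ c, (ix.getD c PySem.Dict.empty).keys.Nodup) :
    ∀ c, ((cols.foldl (bInitCol r0) ix).getD c PySem.Dict.empty).keys.Nodup := by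
  induction cols generalizing ix with
  | nil => exact h
  | cons c0 cols ihc =>
    simp only [List.foldl_cons]
    apply ihc
    intro c
    unfold bInitCol
    by_cases hc : c = c0
    · subst hc
      rw [PySem.Dict.getD_insert_self]
      exact PySem.Dict.nodup_keys_insert _ _ _ (h c)
    · rw [PySem.Dict.getD_insert_of_ne _ _ _ hc]
      exact h c

lemma initcol_counts (r0 : String) (cols : List String) (ix : PySem.Dict String (PySem.Dict String Int)) :
    ∀ c r, ((cols.foldl (bInitCol r0) ix).getD c PySem.Dict.empty).getD r 0
      = (ix.getD c PySem.Dict.empty).getD r 0 + if r = r0 then (cols.count c : Int) else 0 := by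
  induction cols generalizing ix with
  | nil => simp
  | cons c0 cols ihc =>
    intro c r
    simp only [List.foldl_cons]
    rw [ihc]
    unfold bInitCol
    by_cases hc : c = c0
    · subst hc
      rw [PySem.Dict.getD_insert_self]
      by_cases hr : r = r0
      · subst hr
        rw [PySem.Dict.getD_insert_self]
        simp
        ring
      · rw [PySem.Dict.getD_insert_of_ne _ _ _ hr]
        simp [hr]
    · rw [PySem.Dict.getD_insert_of_ne _ _ _ hc]
      have hcc : (c0 :: cols).count c = cols.count c := by
        simp [Ne.symm hc]
      rw [hcc]

lemma getD_mk_not_mem (l : List (String × List String)) (r : String) (h : r ∉ l.map Prod.fst) :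
    (PySem.Dict.mk l).getD r [] = [] := by
  apply PySem.Dict.getD_of_not_contains
  apply not_contains_of_not_mem
  simpa [PySem.Dict.keys] using h

lemma init_counts (l : List (String × List String)) (hnd : (l.map Prod.fst).Nodup)
    (ix0 : PySem.Dict String (PySem.Dict String Int)) (c r : String) :
    ((l.foldl (fun ix (p : String × List String) => p.2.foldl (bInitCol p.1) ix) ix0).getD c PySem.Dict.empty).getD r 0
      = (ix0.getD c PySem.Dict.empty).getD r 0 + (((PySem.Dict.mk l).getD r []).count c : Int) := by
  induction l generalizing ix0 with
  | nil =>
    simp [getD_mk_not_mem [] r (by simp)]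
  | cons p l ihl =>
    have hnd' : (l.map Prod.fst).Nodup := (List.nodup_cons.mp (by simpa using hnd)).2
    have hpn : p.1 ∉ l.map Prod.fst := (List.nodup_cons.mp (by simpa using hnd)).1
    simp only [List.foldl_cons]
    rw [ihl hnd', initcol_counts]
    have hmk : (PySem.Dict.mk (p :: l)).getD r [] =
        if r = p.1 then p.2 else (PySem.Dict.mk l).getD r [] := by
      rw [PySem.Dict.getD_eq_get?_getD, PySem.Dict.get?_mk_cons]
      by_cases hr : r = p.1
      · simp [hr]
      · have hb : (p.1 == r) = false := beq_eq_false_iff_ne.mpr (Ne.symm hr)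
        simp [hb, PySem.Dict.getD_eq_get?_getD, hr]
    rw [hmk]
    by_cases hr : r = p.1
    · subst hr
      rw [getD_mk_not_mem l p.1 hpn]
      simp
    · simp [hr]

lemma init_order (l : List (String × List String)) (hnd : (l.map Prod.fst).Nodup) :
    (l.foldl (fun (o : PySem.Dict String Int) (p : String × List String) => o.insert p.1 (o.size : Int)) PySem.Dict.empty).keys = l.map Prod.fst ∧
    ∀ r ∈ l.map Prod.fst,
      (l.foldl (fun (o : PySem.Dict String Int) (p : String × List String) => o.insert p.1 (o.size : Int)) PySem.Dict.empty).getD r 0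
        = ((l.map Prod.fst).idxOf r : Int) := by
  induction l using List.reverseRecOn with
  | nil => simp [PySem.Dict.keys_empty]
  | append_singleton l p ihl =>
    have hnd2 : (l.map Prod.fst ++ List.map Prod.fst [p]).Nodup := by
      rw [← List.map_append]; exact hnd
    have hnd' : (l.map Prod.fst).Nodup := (List.nodup_append.mp hnd2).1
    have hpn : p.1 ∉ l.map Prod.fst := by
      intro hm
      rcases List.nodup_append.mp hnd2 with ⟨-, -, hdisj⟩
      exact hdisj p.1 hm p.1 (by simp) rfl
    obtain ⟨ihk, ihv⟩ := ihl hnd'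
    simp only [List.foldl_append, List.foldl_cons, List.foldl_nil, List.map_append]
    set o := l.foldl (fun (o : PySem.Dict String Int) (p : String × List String) => o.insert p.1 (o.size : Int)) PySem.Dict.empty with ho
    have hocf : o.contains p.1 = false :=
      not_contains_of_not_mem o p.1 (by rw [ihk]; exact hpn)
    have hkeys : (o.insert p.1 (o.size : Int)).keys = o.keys ++ [p.1] :=
      PySem.Dict.keys_insert_of_not_contains _ _ hocf
    have hsize : o.size = (l.map Prod.fst).length := by
      have h1 : o.keys.length = o.items.length := by simp [PySem.Dict.keys]
      rw [← ihk, h1]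
      rfl
    constructor
    · rw [hkeys, ihk]
      simp
    · intro r hr
      rcases List.mem_append.mp hr with hr' | hr'
      · have hrp : r ≠ p.1 := fun h => hpn (h ▸ hr')
        rw [PySem.Dict.getD_insert_of_ne _ _ _ hrp, List.idxOf_append_of_mem hr']
        exact ihv r hr'
      · have hrp : r = p.1 := by simpa using hr'
        subst hrp
        rw [PySem.Dict.getD_insert_self, List.idxOf_append_of_notMem hpn]
        simp [hsize, List.idxOf_cons_self]

-- every inner dict of the initial index has nodup keys
lemma initcol_nodup' (l : List (String × List String)) (ix0 : PySem.Dict String (PySem.Dict String Int))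
    (h : ∀ c, (ix0.getD c PySem.Dict.empty).keys.Nodup) :
    ∀ c, ((l.foldl (fun ix (p : String × List String) => p.2.foldl (bInitCol p.1) ix) ix0).getD c PySem.Dict.empty).keys.Nodup := by
  induction l generalizing ix0 with
  | nil => exact h
  | cons p l ihl =>
    simp only [List.foldl_cons]
    exact ihl _ (initcol_nodup p.1 p.2 ix0 h)

lemma init_inv (sn : PySem.Dict String (List String)) (h : sn.keys.Nodup) :
    StInv sn (bInit sn).1 (bInit sn).2 := by
  have hsplit : bInit sn =
      (sn.items.foldl (fun (o : PySem.Dict String Int) (p : String × List String) => o.insert p.1 (o.size : Int)) PySem.Dict.empty,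
       sn.items.foldl (fun ix (p : String × List String) => p.2.foldl (bInitCol p.1) ix) PySem.Dict.empty) := by
    unfold bInit
    exact PySem.List.foldl_prod_mk (fun (o : PySem.Dict String Int) (p : String × List String) => o.insert p.1 (o.size : Int)) (fun ix (p : String × List String) => p.2.foldl (bInitCol p.1) ix) sn.items PySem.Dict.empty PySem.Dict.empty
  have hfst : sn.items.map Prod.fst = sn.keys := rfl
  have hnd : (sn.items.map Prod.fst).Nodup := by rw [hfst]; exact h
  obtain ⟨hok, hov⟩ := init_order sn.items hnd
  have hmk : PySem.Dict.mk sn.items = sn := rfl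
  rw [hsplit]
  refine ⟨h, ?_, ?_, ?_, ?_⟩
  · exact hok.trans hfst
  · intro r hr
    rw [← hfst] at hr ⊢
    exact hov r hr
  · exact initcol_nodup' sn.items PySem.Dict.empty (by intro c; simp [PySem.Dict.getD_empty, PySem.Dict.keys_empty])
  · intro c r
    rw [init_counts sn.items hnd PySem.Dict.empty c r, hmk]
    simp [PySem.Dict.getD_empty]

lemma fold_cols (k : String) (cols : List String) (sn : PySem.Dict String (List String))
    (order : PySem.Dict String Int) (ix : PySem.Dict String (PySem.Dict String Int))
    (h : StInv sn order ix) :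
    (cols.foldl (bStep k) (sn, order, ix)).1 = cols.foldl (aStep k) sn ∧
      StInv (cols.foldl (bStep k) (sn, order, ix)).1 (cols.foldl (bStep k) (sn, order, ix)).2.1
        (cols.foldl (bStep k) (sn, order, ix)).2.2 := by
  induction cols generalizing sn order ix with
  | nil => exact ⟨rfl, h⟩
  | cons c cols ihc =>
    simp only [List.foldl_cons]
    obtain ⟨he, hinv⟩ := step_eq k sn order ix c h
    have heta : bStep k (sn, order, ix) c =
        ((bStep k (sn, order, ix) c).1, (bStep k (sn, order, ix) c).2.1, (bStep k (sn, order, ix) c).2.2) := rfl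
    rw [heta, he]
    rw [he] at hinv
    exact ihc _ _ _ hinv

lemma fold_roles (ps : List (String × List String)) (sn : PySem.Dict String (List String))
    (order : PySem.Dict String Int) (ix : PySem.Dict String (PySem.Dict String Int))
    (h : StInv sn order ix) :
    (ps.foldl (fun st p => p.2.foldl (bStep p.1) st) (sn, order, ix)).1
      = ps.foldl (fun s (p : String × List String) => p.2.foldl (aStep p.1) s) sn := by
  induction ps generalizing sn order ix with
  | nil => rfl
  | cons p ps ihp =>
    simp only [List.foldl_cons]
    obtain ⟨he, hinv⟩ := fold_cols p.1 p.2 sn order ix h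
    have heta : p.2.foldl (bStep p.1) (sn, order, ix) =
        ((p.2.foldl (bStep p.1) (sn, order, ix)).1, (p.2.foldl (bStep p.1) (sn, order, ix)).2.1,
          (p.2.foldl (bStep p.1) (sn, order, ix)).2.2) := rfl
    rw [heta, he]
    rw [he] at hinv
    exact ihp _ _ _ hinv

theorem main_eq (sniffed_roles roles : List (String × List String)) :
    update_sniffed_roles_py sniffed_roles roles = update_sniffed_roles_py_alt sniffed_roles roles := by
  unfold update_sniffed_roles_py update_sniffed_roles_py_alt
  have hinv := init_inv (PySem.Dict.ofList sniffed_roles) (PySem.Dict.nodup_keys_ofList _)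
  have h1 := fold_roles (PySem.Dict.ofList roles).items (PySem.Dict.ofList sniffed_roles)
    (bInit (PySem.Dict.ofList sniffed_roles)).1 (bInit (PySem.Dict.ofList sniffed_roles)).2 hinv
  have hitems : (PySem.Dict.ofList roles).items =
      (PySem.Dict.ofList roles).keys.map (fun k => (k, (PySem.Dict.ofList roles).getD k [])) :=
    PySem.Dict.items_eq_map_keys _ (PySem.Dict.nodup_keys_ofList _) _
  have h2 : ((PySem.Dict.ofList roles).items.foldl (fun st p => p.2.foldl (bStep p.1) st)
      (PySem.Dict.ofList sniffed_roles, (bInit (PySem.Dict.ofList sniffed_roles)).1,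
        (bInit (PySem.Dict.ofList sniffed_roles)).2)).1
      = (PySem.Dict.ofList roles).keys.foldl
          (fun s new_role => ((PySem.Dict.ofList roles).getD new_role []).foldl (aStep new_role) s)
          (PySem.Dict.ofList sniffed_roles) := by
    rw [h1, hitems, List.foldl_map]
  exact congrArg PySem.Dict.items h2.symm

-- ===== VERDICT (by name: the statement is the Claim_ definition above) =====
theorem update_sniffed_roles_py_spec : Claim_equal_update_sniffed_roles_py := by
  intro sn roles _
  unfold Spec_update_sniffed_roles_py
  exact main_eq sn roles
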